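-- pv_equiv track=rewrite | github.com/TiagoJRAlmeida/UA-LECI | projects/PECI/PECI-G2-main/src/Clustering/clustering.py | postprocess_by_region
-- ===== SOURCE A (Python) =====
-- REGION_KEYWORDS = {
--     # Full names
--     'usa', 'us', 'uk', 'germany', 'greece', 'china', 'india', 'israel', 'egypt', 'uae',
--     'turkey', 'saudi', 'france', 'spain', 'italy', 'canada', 'brazil', 'mexico', 'australia',
--     'panama', 'japan', 'senegal', 'colombia', 'vietnam', 'indonesia', 'netherlands',
--     'south africa', 'portugal', 'argentina', 'singapore', 'russia', 'poland', 'peru', 'chile',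
--     'morocco', 'algeria', 'kenya', 'tanzania', 'ghana', 'nigeria', 'costa rica', 'ecuador',
--     'bolivia', 'uruguay', 'venezuela', 'honduras', 'guatemala', 'nicaragua', 'paraguay',
--     'dominican', 'el salvador', 'lebanon', 'sri lanka', 'bangladesh', 'nepal', 'pakistan',
--     'thailand', 'malaysia', 'myanmar', 'taiwan', 'hong kong', 'south korea', 'korea', 'mozambique',
--     'angola', 'tunisia', 'libya', 'zambia', 'zimbabwe', 'cameroon', 'ethiopia', 'botswana',
--
--     # Cities or custom regions
--     'dubai', 'riyadh', 'jeddah', 'cairo', 'doha', 'abu dhabi', 'amman', 'santiago',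
--     'barcelona', 'madrid', 'guadalajara', 'monterrey', 'puebla', 'lyon', 'porto', 'lisbon',
--     'paris', 'milan', 'milano', 'napoli', 'rome', 'athens', 'sofia', 'bucharest', 'vienna',
--     'warsaw', 'zagreb', 'brussels', 'oslo', 'stockholm', 'copenhagen', 'geneva', 'lausanne',
--     'luxembourg', 'shanghai', 'beijing', 'shenzhen', 'qingdao', 'xiamen', 'tianjin',
--
--     # ISO Alpha-2 country codes
--     'us', 'fr', 'de', 'pt', 'es', 'it', 'nl', 'be', 'se', 'no', 'fi', 'dk', 'pl', 'gr',
--     'ro', 'bg', 'cz', 'hu', 'sk', 'si', 'at', 'ch', 'ie', 'ru', 'tr', 'cn', 'jp', 'kr', 'in',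
--     'id', 'th', 'my', 'vn', 'sg', 'ph', 'bd', 'pk', 'il', 'eg', 'sa', 'ae', 'qa', 'kw', 'dz',
--     'ma', 'tn', 'ng', 'gh', 'za', 'zm', 'zw', 'cm', 'ke', 'tz',
--
--     # ISO Alpha-3 codes (and common short customs abbreviations)
--     'usa', 'mex', 'can', 'esp', 'bra', 'deu', 'fra', 'ita', 'prt', 'nld', 'bel', 'che', 'swe',
--     'nor', 'fin', 'dnk', 'pol', 'grc', 'rou', 'bgr', 'cze', 'hun', 'svk', 'svn', 'aut', 'irl',
--     'gbr', 'rus', 'tur', 'chn', 'jpn', 'kor', 'ind', 'idn', 'tha', 'mys', 'vnm', 'sgp', 'phl',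
--     'pak', 'bgd', 'isr', 'egy', 'sau', 'are', 'qat', 'kwt', 'dza', 'mar', 'tun', 'nga', 'gha',
--     'zaf', 'zmb', 'zwe', 'cmr', 'ken', 'tza',
--
--     # Seen in the clusters
--     'esp', 'pt', 'po', 'sh', 'sur', 'sor', 'ne', 'lim', 'sen', 'del', 'mex'
-- }
--
-- def extract_regions(name):
--     tokens = name.split()
--     regions = {t for t in tokens if t in REGION_KEYWORDS}
--     if not regions:
--         return {"default"}
--
--     # Optional: Prioritize last token if it's a region
--     if tokens[-1] in REGION_KEYWORDS:
--         return {tokens[-1]}  # force clear region tag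
--
--     return regions
--
-- def postprocess_by_region(clusters):
--     new_clusters = []
--
--     for cluster in clusters:
--         name_to_regions = {name: extract_regions(name) for name in cluster}
--
--         # Group names by region overlap
--         region_groups = []
--         assigned = set()
--
--         for name, regions in name_to_regions.items():
--             if name in assigned:
--                 continue
--             group = [name]
--             assigned.add(name)
--
--             for other_name, other_regions in name_to_regions.items():
--                 if other_name in assigned:
--                     continue
--                 if regions & other_regions:  # any shared region
--                     group.append(other_name)
--                     assigned.add(other_name)
--
--             region_groups.append(group)
--
--         new_clusters.extend(region_groups)
--
--     return new_clusters
-- ===== SOURCE B (Python) =====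
-- # keyword table kept as compact comma-separated rows, expanded once into a set
-- REGION_KEYWORD_ROWS = (
--     'usa,us,uk,germany,greece,china,india,israel',
--     'egypt,uae,turkey,saudi,france,spain,italy,canada',
--     'brazil,mexico,australia,panama,japan,senegal,colombia,vietnam',
--     'indonesia,netherlands,south africa,portugal,argentina,singapore,russia,poland',
--     'peru,chile,morocco,algeria,kenya,tanzania,ghana,nigeria',
--     'costa rica,ecuador,bolivia,uruguay,venezuela,honduras,guatemala,nicaragua',
--     'paraguay,dominican,el salvador,lebanon,sri lanka,bangladesh,nepal,pakistan',
--     'thailand,malaysia,myanmar,taiwan,hong kong,south korea,korea,mozambique',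
--     'angola,tunisia,libya,zambia,zimbabwe,cameroon,ethiopia,botswana',
--     'dubai,riyadh,jeddah,cairo,doha,abu dhabi,amman,santiago',
--     'barcelona,madrid,guadalajara,monterrey,puebla,lyon,porto,lisbon',
--     'paris,milan,milano,napoli,rome,athens,sofia,bucharest',
--     'vienna,warsaw,zagreb,brussels,oslo,stockholm,copenhagen,geneva',
--     'lausanne,luxembourg,shanghai,beijing,shenzhen,qingdao,xiamen,tianjin',
--     'us,fr,de,pt,es,it,nl,be',
--     'se,no,fi,dk,pl,gr,ro,bg',
--     'cz,hu,sk,si,at,ch,ie,ru',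
--     'tr,cn,jp,kr,in,id,th,my',
--     'vn,sg,ph,bd,pk,il,eg,sa',
--     'ae,qa,kw,dz,ma,tn,ng,gh',
--     'za,zm,zw,cm,ke,tz,usa,mex',
--     'can,esp,bra,deu,fra,ita,prt,nld',
--     'bel,che,swe,nor,fin,dnk,pol,grc',
--     'rou,bgr,cze,hun,svk,svn,aut,irl',
--     'gbr,rus,tur,chn,jpn,kor,ind,idn',
--     'tha,mys,vnm,sgp,phl,pak,bgd,isr',
--     'egy,sau,are,qat,kwt,dza,mar,tun',
--     'nga,gha,zaf,zmb,zwe,cmr,ken,tza',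
--     'esp,pt,po,sh,sur,sor,ne,lim',
--     'sen,del,mex',
-- )
--
-- REGION_KEYWORDS = set(w for row in REGION_KEYWORD_ROWS for w in row.split(","))
--
--
-- def extract_regions(name):
--     tokens = name.split()
--     if tokens and tokens[-1] in REGION_KEYWORDS:
--         return {tokens[-1]}
--     regions = {t for t in tokens if t in REGION_KEYWORDS}
--     return regions if regions else {"default"}
--
--
-- def _group_cluster(cluster):
--     groups = []       # groups grown for this cluster, in seed order
--     region_seed = {}  # region keyword -> index of the earliest seed group owning it
--     seen = set()      # names already placed (the dict comprehension dedups in A)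
--     for name in cluster:
--         if name in seen:
--             continue
--         seen.add(name)
--         regions = extract_regions(name)
--         idxs = [region_seed[r] for r in regions if r in region_seed]
--         if idxs:
--             # earliest seed sharing a region absorbs the name
--             groups[min(idxs)].append(name)
--         else:
--             # new seed: claim all its regions
--             i = len(groups)
--             groups.append([name])
--             for r in regions:
--                 region_seed[r] = i
--     return groups
--
--
-- def postprocess_by_region(clusters):
--     return [group for cluster in clusters for group in _group_cluster(cluster)]
-- ===== Notes on version B (the rewrite author's own statement) =====
-- stated objective: alternative
-- what changed: A rescans the whole cluster once per seed (nested loops over the name dict with an assigned-set); B makes a single pass per cluster, keeping a region->earliest-seed-index dict and appending each name to the lowest-indexed seed group sharing a region (or opening a new seed group), and flattens with a list comprehension.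
import Mathlib
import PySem

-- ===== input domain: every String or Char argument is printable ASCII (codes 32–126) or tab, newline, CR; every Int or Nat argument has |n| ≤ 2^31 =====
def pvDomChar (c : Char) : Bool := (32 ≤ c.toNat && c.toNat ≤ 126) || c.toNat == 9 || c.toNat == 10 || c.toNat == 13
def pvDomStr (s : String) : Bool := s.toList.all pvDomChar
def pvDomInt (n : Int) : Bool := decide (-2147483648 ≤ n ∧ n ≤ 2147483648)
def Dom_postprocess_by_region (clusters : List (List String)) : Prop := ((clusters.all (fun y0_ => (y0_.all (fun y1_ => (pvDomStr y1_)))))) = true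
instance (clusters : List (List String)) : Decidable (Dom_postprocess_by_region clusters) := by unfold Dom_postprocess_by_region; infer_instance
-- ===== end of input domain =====

-- B replaces A's per-seed rescan of the whole cluster (nested loops with an assigned-set)
-- by a single pass per cluster with a region→earliest-seed-index map (objective: alternative).

-- ===== PORT A =====

def REGION_KEYWORDS : PySem.Set String := PySem.Set.ofList ["usa", "us", "uk", "germany", "greece", "china", "india", "israel", "egypt", "uae", "turkey", "saudi", "france", "spain", "italy", "canada", "brazil", "mexico", "australia", "panama", "japan", "senegal", "colombia", "vietnam", "indonesia", "netherlands", "south africa", "portugal", "argentina", "singapore", "russia", "poland", "peru", "chile", "morocco", "algeria", "kenya", "tanzania", "ghana", "nigeria", "costa rica", "ecuador", "bolivia", "uruguay", "venezuela", "honduras", "guatemala", "nicaragua", "paraguay", "dominican", "el salvador", "lebanon", "sri lanka", "bangladesh", "nepal", "pakistan", "thailand", "malaysia", "myanmar", "taiwan", "hong kong", "south korea", "korea", "mozambique", "angola", "tunisia", "libya", "zambia", "zimbabwe", "cameroon", "ethiopia", "botswana", "dubai", "riyadh", "jeddah", "cairo", "doha", "abu dhabi", "amman", "santiago", "barcelona",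 "madrid", "guadalajara", "monterrey", "puebla", "lyon", "porto", "lisbon", "paris", "milan", "milano", "napoli", "rome", "athens", "sofia", "bucharest", "vienna", "warsaw", "zagreb", "brussels", "oslo", "stockholm", "copenhagen", "geneva", "lausanne", "luxembourg", "shanghai", "beijing", "shenzhen", "qingdao", "xiamen", "tianjin", "us", "fr", "de", "pt", "es", "it", "nl", "be", "se", "no", "fi", "dk", "pl", "gr", "ro", "bg", "cz", "hu", "sk", "si", "at", "ch", "ie", "ru", "tr", "cn", "jp", "kr", "in", "id", "th", "my", "vn", "sg", "ph", "bd", "pk", "il", "eg", "sa", "ae", "qa", "kw", "dz", "ma", "tn", "ng", "gh", "za", "zm", "zw", "cm", "ke", "tz", "usa", "mex", "can", "esp", "bra", "deu", "fra", "ita", "prt", "nld", "bel", "che", "swe", "nor", "fin", "dnk", "pol", "grc", "rou", "bgr", "cze", "hun", "svk", "svn", "aut", "irl", "gbr", "rus", "tur", "chn", "jpn", "kor", "ind", "idn", "tha", "mys", "vnm", "sgp", "phl", "pak", "bgd", "isr", "egy", "sau", "are", "qat", "kwt", "dza", "mar", "tun", "nga", "gha", "zaf", "zmb", "zwe", "cmr",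 "ken", "tza", "esp", "pt", "po", "sh", "sur", "sor", "ne", "lim", "sen", "del", "mex"]

-- truthiness of 'regions & other_regions' (set intersection is non-empty)
def ovb (regions other : List String) : Bool := !(PySem.Set.inter regions other).isEmpty

def extract_regions (name : String) : List String :=
  let tokens := PySem.Str.split₀ name
  let regions : PySem.Set String :=
    PySem.Set.ofList (tokens.filter (fun t => REGION_KEYWORDS.contains t))
  if regions.isEmpty then ["default"]
  else
    -- tokens[-1]; tokens ≠ [] here because regions ≠ [], so pyGet? is some (default unreachable)
    match PySem.List.pyGet? tokens (-1) with
    | some last => if REGION_KEYWORDS.contains last then [last] else regions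
    | none => regions

-- body of A's inner 'for other_name, other_regions in name_to_regions.items():' loop
def aInner (regions : List String) (ga : List String × PySem.Set String)
    (onr : String × List String) : List String × PySem.Set String :=
  if ga.2.contains onr.1 then ga
  else if ovb regions onr.2 then (ga.1 ++ [onr.1], ga.2.add onr.1)
  else ga

-- body of A's outer 'for name, regions in name_to_regions.items():' loop
def aOuter (items : List (String × List String))
    (st : List (List String) × PySem.Set String) (nr : String × List String) :
    List (List String) × PySem.Set String :=
  if st.2.contains nr.1 then st
  else
    let ga := items.foldl (aInner nr.2) ([nr.1], st.2.add nr.1)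
    (st.1 ++ [ga.1], ga.2)

-- A's per-cluster work: dict comprehension, then the double loop over its items
def aCluster (cluster : List String) : List (List String) :=
  let name_to_regions : PySem.Dict String (List String) :=
    cluster.foldl (fun d name => d.insert name (extract_regions name)) PySem.Dict.empty
  (name_to_regions.items.foldl (aOuter name_to_regions.items) ([], PySem.Set.empty)).1

def postprocess_by_region (clusters : List (List String)) : List (List String) :=
  clusters.foldl (fun new_clusters cluster => new_clusters ++ aCluster cluster) []

-- ===== PORT B =====

-- Source B keeps the keyword table as comma-separated rows, expanded once by str.split(",")
def REGION_KEYWORD_ROWS : List String := [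
  "usa,us,uk,germany,greece,china,india,israel",
  "egypt,uae,turkey,saudi,france,spain,italy,canada",
  "brazil,mexico,australia,panama,japan,senegal,colombia,vietnam",
  "indonesia,netherlands,south africa,portugal,argentina,singapore,russia,poland",
  "peru,chile,morocco,algeria,kenya,tanzania,ghana,nigeria",
  "costa rica,ecuador,bolivia,uruguay,venezuela,honduras,guatemala,nicaragua",
  "paraguay,dominican,el salvador,lebanon,sri lanka,bangladesh,nepal,pakistan",
  "thailand,malaysia,myanmar,taiwan,hong kong,south korea,korea,mozambique",
  "angola,tunisia,libya,zambia,zimbabwe,cameroon,ethiopia,botswana",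
  "dubai,riyadh,jeddah,cairo,doha,abu dhabi,amman,santiago",
  "barcelona,madrid,guadalajara,monterrey,puebla,lyon,porto,lisbon",
  "paris,milan,milano,napoli,rome,athens,sofia,bucharest",
  "vienna,warsaw,zagreb,brussels,oslo,stockholm,copenhagen,geneva",
  "lausanne,luxembourg,shanghai,beijing,shenzhen,qingdao,xiamen,tianjin",
  "us,fr,de,pt,es,it,nl,be",
  "se,no,fi,dk,pl,gr,ro,bg",
  "cz,hu,sk,si,at,ch,ie,ru",
  "tr,cn,jp,kr,in,id,th,my",
  "vn,sg,ph,bd,pk,il,eg,sa",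
  "ae,qa,kw,dz,ma,tn,ng,gh",
  "za,zm,zw,cm,ke,tz,usa,mex",
  "can,esp,bra,deu,fra,ita,prt,nld",
  "bel,che,swe,nor,fin,dnk,pol,grc",
  "rou,bgr,cze,hun,svk,svn,aut,irl",
  "gbr,rus,tur,chn,jpn,kor,ind,idn",
  "tha,mys,vnm,sgp,phl,pak,bgd,isr",
  "egy,sau,are,qat,kwt,dza,mar,tun",
  "nga,gha,zaf,zmb,zwe,cmr,ken,tza",
  "esp,pt,po,sh,sur,sor,ne,lim",
  "sen,del,mex"]

def bKeywords : PySem.Set String :=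
  PySem.Set.ofList (REGION_KEYWORD_ROWS.flatMap (fun row => (PySem.Str.split? row ",").getD []))

-- 'regions if regions else {"default"}' over the keyword tokens
def bRegionsOrDefault (tokens : List String) : List String :=
  let regions : PySem.Set String :=
    PySem.Set.ofList (tokens.filter (fun t => bKeywords.contains t))
  if regions.isEmpty then ["default"] else regions

-- Source B's extract_regions: the last-token check comes FIRST ('tokens and tokens[-1] in …')
def bExtract (name : String) : List String :=
  let tokens := PySem.Str.split₀ name
  match PySem.List.pyGet? tokens (-1) with
  | none => bRegionsOrDefault tokens                       -- tokens == []: 'tokens and …' is falsy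
  | some last =>
      if bKeywords.contains last then [last]
      else bRegionsOrDefault tokens

-- Source B's 'for name in cluster:' loop as structural recursion; state = (groups, region_seed, seen)
def bGo : List String → List (List String) → PySem.Dict String Nat → PySem.Set String →
    List (List String)
  | [], groups, _, _ => groups
  | name :: rest, groups, region_seed, seen =>
      if seen.contains name then bGo rest groups region_seed seen
      else
        let regions := bExtract name
        match PySem.List.min? (regions.filterMap (fun r => region_seed.get? r)) (fun i => i) with
        | some i =>  -- 'if idxs: groups[min(idxs)].append(name)' (min? is none ↔ idxs is empty)
            bGo rest (groups.modify i (fun g => g ++ [name])) region_seed (seen.add name)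
        | none =>    -- new seed: claim all its regions
            bGo rest (groups ++ [[name]])
              (regions.foldl (fun m r => m.insert r groups.length) region_seed) (seen.add name)

def bCluster (cluster : List String) : List (List String) :=
  bGo cluster [] PySem.Dict.empty PySem.Set.empty

-- the flattening list comprehension of Source B
def postprocess_by_region_alt (clusters : List (List String)) : List (List String) :=
  clusters.flatMap bCluster

-- ===== PRECONDITION & SPEC =====
def Spec_postprocess_by_region (clusters : List (List String)) (out : List (List String)) : Prop := out = postprocess_by_region_alt clusters
instance (clusters : List (List String)) (out : List (List String)) : Decidable (Spec_postprocess_by_region clusters out) := by unfold Spec_postprocess_by_region; infer_instance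

-- ===== CLAIM (what is proved, stated in full; the proofs are below) =====
def Claim_equal_postprocess_by_region : Prop := ∀ (clusters : List (List String)), Dom_postprocess_by_region clusters → Spec_postprocess_by_region clusters (postprocess_by_region clusters)

-- ===== LEMMAS AND PROOFS =====

-- B's rows, split and flattened, are exactly A's keyword list (with its duplicates, in order) …
set_option maxRecDepth 100000 in
set_option maxHeartbeats 8000000 in
theorem pv_rows_eq :
    REGION_KEYWORD_ROWS.flatMap (fun row => (PySem.Str.split? row ",").getD [])
      = ["usa", "us", "uk", "germany", "greece", "china", "india", "israel", "egypt", "uae", "turkey", "saudi", "france", "spain", "italy", "canada", "brazil", "mexico", "australia", "panama", "japan", "senegal", "colombia", "vietnam", "indonesia", "netherlands", "south africa", "portugal", "argentina", "singapore", "russia", "poland", "peru", "chile", "morocco", "algeria", "kenya", "tanzania", "ghana", "nigeria", "costa rica", "ecuador", "bolivia", "uruguay", "venezuela", "honduras", "guatemala", "nicaragua", "paraguay", "dominican", "el salvador", "lebanon", "sri lanka", "bangladesh", "nepal", "pakistan", "thailand", "malaysia", "myanmar", "taiwan", "hong kong", "south korea", "korea", "mozambique", "angola", "tunisia", "libya",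 "zambia", "zimbabwe", "cameroon", "ethiopia", "botswana", "dubai", "riyadh", "jeddah", "cairo", "doha", "abu dhabi", "amman", "santiago", "barcelona", "madrid", "guadalajara", "monterrey", "puebla", "lyon", "porto", "lisbon", "paris", "milan", "milano", "napoli", "rome", "athens", "sofia", "bucharest", "vienna", "warsaw", "zagreb", "brussels", "oslo", "stockholm", "copenhagen", "geneva", "lausanne", "luxembourg", "shanghai", "beijing", "shenzhen", "qingdao", "xiamen", "tianjin", "us", "fr", "de", "pt", "es", "it", "nl", "be", "se", "no", "fi", "dk", "pl", "gr", "ro", "bg", "cz", "hu", "sk", "si", "at", "ch", "ie", "ru", "tr", "cn", "jp", "kr", "in", "id", "th", "my", "vn", "sg", "ph", "bd", "pk", "il", "eg", "sa", "ae", "qa", "kw", "dz", "ma", "tn", "ng", "gh", "za", "zm", "zw", "cm", "ke", "tz", "usa", "mex", "can", "esp", "bra", "deu", "fra", "ita", "prt", "nld", "bel", "che", "swe", "nor", "fin", "dnk", "pol", "grc", "rou", "bgr", "cze", "hun", "svk", "svn", "aut", "irl", "gbr", "rus", "tur", "chn", "jpn", "kor", "ind", "idn", "tha", "mys", "vnm",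 "sgp", "phl", "pak", "bgd", "isr", "egy", "sau", "are", "qat", "kwt", "dza", "mar", "tun", "nga", "gha", "zaf", "zmb", "zwe", "cmr", "ken", "tza", "esp", "pt", "po", "sh", "sur", "sor", "ne", "lim", "sen", "del", "mex"] := by decide

-- … so the two keyword SETS coincide definitionally
theorem pv_keywords_eq : bKeywords = REGION_KEYWORDS :=
  congrArg PySem.Set.ofList pv_rows_eq

theorem pyGet?_mem_of_some {α : Type} (xs : List α) (i : Int) (x : α)
    (h : PySem.List.pyGet? xs i = some x) : x ∈ xs := by
  unfold PySem.List.pyGet? at h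
  cases hidx : PySem.List.pyIdx? xs.length i with
  | none => rw [hidx] at h; cases h
  | some j => rw [hidx] at h; exact List.mem_of_getElem? h

theorem bExtract_eq (name : String) : bExtract name = extract_regions name := by
  unfold bExtract extract_regions bRegionsOrDefault
  rw [pv_keywords_eq]
  cases hg : PySem.List.pyGet? (PySem.Str.split₀ name) (-1) with
  | none => simp only [hg]
  | some last =>
    by_cases hc : REGION_KEYWORDS.contains last = true
    · have hmem : last ∈ PySem.Str.split₀ name := pyGet?_mem_of_some _ _ _ hg
      have hfil : last ∈ (PySem.Str.split₀ name).filter (fun t => REGION_KEYWORDS.contains t) :=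
        List.mem_filter.2 ⟨hmem, hc⟩
      have hne : ¬ (PySem.Set.ofList ((PySem.Str.split₀ name).filter
          (fun t => REGION_KEYWORDS.contains t))).isEmpty = true := by
        rw [List.isEmpty_iff]
        intro he
        have : last ∈ PySem.Set.ofList ((PySem.Str.split₀ name).filter
            (fun t => REGION_KEYWORDS.contains t)) := (PySem.Set.mem_ofList _ _).2 hfil
        rw [he] at this
        exact List.not_mem_nil this
      rw [List.isEmpty_iff] at hne
      simp only [hg, List.isEmpty_iff]
      rw [if_pos hc, if_neg hne, if_pos hc]
    · simp only [hg, List.isEmpty_iff]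
      rw [if_neg hc, if_neg hc]

-- The common reference: greedy grouping of (name, regions) items — take the first item as a
-- seed, absorb every later item sharing a region with the SEED, recurse on the rest.
def PRef : List (String × List String) → List (List String)
  | [] => []
  | (n, R) :: rest =>
      (n :: ((rest.filter (fun x => ovb R x.2)).map (fun x => x.1)))
        :: PRef (rest.filter (fun x => !ovb R x.2))
termination_by l => l.length
decreasing_by
  simp only [List.length_cons, List.length_unattach]
  exact Nat.lt_succ_of_le (le_trans (List.length_filter_le _ _) (by simp))

-- names of l not yet in A
def pvRem (A : PySem.Set String) (l : List (String × List String)) : List (String × List String) :=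
  l.filter (fun x => !A.contains x.1)

-- items of l absorbed by a seed with region set R, given already-assigned A
def pvSel (R : List String) (A : PySem.Set String) (l : List (String × List String)) :
    List (String × List String) :=
  l.filter (fun x => !A.contains x.1 && ovb R x.2)

-- what a stack σ of seed region-sets captures from l, and what is left
def pvCapt : List (List String) → List (String × List String) →
    List (List String) × List (String × List String)
  | [], l => ([], l)
  | S :: σ, l =>
      let c := (l.filter (fun x => ovb S x.2)).map (fun x => x.1)
      let p := pvCapt σ (l.filter (fun x => !ovb S x.2))
      (c :: p.1, p.2)

-- ordered dedup of a cluster against an initial seen-set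
def pvDedup : PySem.Set String → List String → List String
  | _, [] => []
  | seen, n :: rest =>
      if seen.contains n then pvDedup seen rest else n :: pvDedup (seen.add n) rest

def pvItems (cluster : List String) : List (String × List String) :=
  (pvDedup PySem.Set.empty cluster).map (fun n => (n, extract_regions n))

-- map invariant of B: region r is mapped to i exactly when seed i's region set holds r
def pvInv (m : PySem.Dict String Nat) (σ : List (List String)) : Prop :=
  ∀ r i, m.get? r = some i ↔ ∃ h : i < σ.length, r ∈ σ[i]

-- bGo with the seen-set discharged: B's loop over the deduplicated (name, regions) items
def bGo' : List (String × List String) → List (List String) → PySem.Dict String Nat →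
    List (List String)
  | [], gs, _ => gs
  | (n, R) :: rest, gs, m =>
      match PySem.List.min? (R.filterMap (fun r => m.get? r)) (fun i => i) with
      | some i => bGo' rest (gs.modify i (fun g => g ++ [n])) m
      | none => bGo' rest (gs ++ [[n]]) (R.foldl (fun m r => m.insert r gs.length) m)

theorem ovb_iff (R S : List String) : ovb R S = true ↔ ∃ r, r ∈ R ∧ r ∈ S := by
  constructor
  · intro h
    have hne : PySem.Set.inter R S ≠ [] := by
      intro he; rw [ovb, he] at h; simp at h
    obtain ⟨r, hr⟩ := List.exists_mem_of_ne_nil _ hne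
    exact ⟨r, (PySem.Set.mem_inter R S r).1 hr⟩
  · rintro ⟨r, h1, h2⟩
    have : r ∈ PySem.Set.inter R S := (PySem.Set.mem_inter R S r).2 ⟨h1, h2⟩
    rw [ovb, Bool.not_eq_true', List.isEmpty_eq_false_iff]
    intro he; rw [he] at this; exact (List.not_mem_nil).elim this

theorem set_upd_eq (cluster : List String) :
    ∀ seen : PySem.Set String, PySem.Set.update seen cluster = seen ++ pvDedup seen cluster := by
  induction cluster with
  | nil => intro seen; simp [PySem.Set.update, pvDedup]
  | cons n rest ih =>
    intro seen
    have hstep : PySem.Set.update seen (n :: rest) = PySem.Set.update (seen.add n) rest := by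
      simp [PySem.Set.update]
    by_cases hc : seen.contains n = true
    · have hadd : seen.add n = seen := by rw [PySem.Set.add, if_pos hc]
      have hm : n ∈ seen := (PySem.Set.contains_iff seen n).1 hc
      rw [hstep, hadd, ih seen]
      simp [pvDedup, hm]
    · have hm : n ∉ seen := fun h => hc ((PySem.Set.contains_iff seen n).2 h)
      rw [hstep, ih (seen.add n)]
      simp [pvDedup, hm]

theorem dedup_empty_eq (cluster : List String) :
    pvDedup PySem.Set.empty cluster = PySem.Set.ofList cluster := by
  have := set_upd_eq cluster PySem.Set.empty
  rw [PySem.Set.update_empty] at this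
  simpa [PySem.Set.empty] using this.symm

theorem nodup_pvDedup_empty (cluster : List String) :
    (pvDedup PySem.Set.empty cluster).Nodup := by
  rw [dedup_empty_eq]; exact PySem.Set.nodup_ofList cluster

-- ---- A side ----

theorem getD_foldl_insert_f (f : String → List String) (l : List String) :
    ∀ (d : PySem.Dict String (List String)) (k : String) (dflt : List String),
    ((l.foldl (fun d n => d.insert n (f n)) d).getD k dflt)
      = if k ∈ l then f k else d.getD k dflt := by
  induction l with
  | nil => intro d k dflt; simp
  | cons n rest ih =>
    intro d k dflt
    rw [List.foldl_cons, ih]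
    by_cases h1 : k ∈ rest
    · simp [h1]
    · by_cases h2 : k = n
      · subst h2; simp [h1]
      · simp [h1, h2, PySem.Dict.getD_insert]

theorem items_foldl_insert_eq (cluster : List String) :
    (cluster.foldl (fun d name => d.insert name (extract_regions name))
        (PySem.Dict.empty : PySem.Dict String (List String))).items = pvItems cluster := by
  set D := cluster.foldl (fun d name => d.insert name (extract_regions name))
    (PySem.Dict.empty : PySem.Dict String (List String)) with hD
  have hkeys : D.keys = PySem.Set.ofList cluster := by
    rw [hD, PySem.Dict.keys_foldl_insert, PySem.Dict.keys_empty]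
    exact PySem.Set.update_empty cluster
  have hnd : D.keys.Nodup := by rw [hkeys]; exact PySem.Set.nodup_ofList cluster
  rw [PySem.Dict.items_eq_map_keys D hnd [], hkeys, pvItems, dedup_empty_eq]
  refine List.map_congr_left ?_
  intro k hk
  have hkc : k ∈ cluster := (PySem.Set.mem_ofList cluster k).1 hk
  rw [hD, getD_foldl_insert_f]
  simp [hkc]

theorem contains_eq_false_iff (A : PySem.Set String) (x : String) :
    A.contains x = false ↔ x ∉ A := by
  constructor
  · intro h hm; rw [(PySem.Set.contains_iff A x).2 hm] at h; cases h
  · intro h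
    cases hcx : A.contains x
    · rfl
    · exact absurd ((PySem.Set.contains_iff A x).1 hcx) h

theorem contains_add_of_ne (A : PySem.Set String) (x y : String) (h : y ≠ x) :
    (A.add x).contains y = A.contains y := by
  by_cases hy : y ∈ A
  · rw [(PySem.Set.contains_iff _ _).2 hy,
      (PySem.Set.contains_iff _ _).2 ((PySem.Set.mem_add A x y).2 (Or.inl hy))]
  · have h1 : y ∉ A.add x := fun hm => ((PySem.Set.mem_add A x y).1 hm).elim hy h
    rw [(contains_eq_false_iff _ _).2 hy, (contains_eq_false_iff _ _).2 h1]

theorem inner_spec (R : List String) :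
    ∀ (l : List (String × List String)) (g : List String) (A : PySem.Set String),
    (l.map (fun x => x.1)).Nodup →
    l.foldl (aInner R) (g, A)
      = (g ++ (pvSel R A l).map (fun x => x.1),
         (pvSel R A l).foldl (fun s x => s.add x.1) A) := by
  intro l
  induction l with
  | nil => intro g A _; simp [pvSel]
  | cons x rest ih =>
    intro g A hnd
    have hnd' : (rest.map (fun x => x.1)).Nodup := (List.nodup_cons.1 hnd).2
    have hx : x.1 ∉ rest.map (fun x => x.1) := (List.nodup_cons.1 hnd).1
    rw [List.foldl_cons]
    by_cases hc : A.contains x.1 = true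
    · have h1 : aInner R (g, A) x = (g, A) := by unfold aInner; rw [if_pos hc]
      have hcond : (!A.contains x.1 && ovb R x.2) = false := by rw [hc]; rfl
      have h2 : pvSel R A (x :: rest) = pvSel R A rest := by
        unfold pvSel; rw [List.filter_cons, if_neg (fun hcontra => by rw [hcond] at hcontra; exact Bool.false_ne_true hcontra)]
      rw [h1, ih g A hnd', h2]
    · have hcf : A.contains x.1 = false := Bool.eq_false_iff.2 hc
      by_cases hov : ovb R x.2 = true
      · have h1 : aInner R (g, A) x = (g ++ [x.1], A.add x.1) := by
          unfold aInner; rw [if_neg hc, if_pos hov]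
        have hsel : pvSel R (A.add x.1) rest = pvSel R A rest := by
          apply List.filter_congr
          intro y hy
          have hne : y.1 ≠ x.1 := fun he => hx (he ▸ List.mem_map_of_mem hy)
          rw [contains_add_of_ne A x.1 y.1 hne]
        have hcond : (!A.contains x.1 && ovb R x.2) = true := by rw [hcf, hov]; rfl
        have hselcons : pvSel R A (x :: rest) = x :: pvSel R A rest := by
          unfold pvSel; rw [List.filter_cons, if_pos hcond]
        rw [h1, ih _ _ hnd', hsel, hselcons]
        simp
      · have h1 : aInner R (g, A) x = (g, A) := by unfold aInner; rw [if_neg hc, if_neg hov]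
        have hovf : ovb R x.2 = false := Bool.eq_false_iff.2 hov
        have hcond : (!A.contains x.1 && ovb R x.2) = false := by rw [hcf, hovf]; rfl
        have h2 : pvSel R A (x :: rest) = pvSel R A rest := by
          unfold pvSel; rw [List.filter_cons, if_neg (fun hcontra => by rw [hcond] at hcontra; exact Bool.false_ne_true hcontra)]
        rw [h1, ih g A hnd', h2]

theorem outer_spec (D : List (String × List String)) (hnd : (D.map (fun x => x.1)).Nodup) :
    ∀ (s p : List (String × List String)) (gs : List (List String)) (A : PySem.Set String),
    D = p ++ s → (∀ x ∈ p, x.1 ∈ A) →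
    (s.foldl (aOuter D) (gs, A)).1 = gs ++ PRef (pvRem A s) := by
  intro s
  induction s with
  | nil => intro p gs A hD hp; simp [pvRem, PRef]
  | cons nr s' ih =>
    obtain ⟨n, R⟩ := nr
    intro p gs A hD hp
    have hnds' : (s'.map (fun x => x.1)).Nodup := by
      rw [hD] at hnd
      simp only [List.map_append, List.map_cons, List.nodup_append] at hnd
      exact (List.nodup_cons.1 hnd.2.1).2
    have hns' : n ∉ s'.map (fun x => x.1) := by
      rw [hD] at hnd
      simp only [List.map_append, List.map_cons, List.nodup_append] at hnd
      exact (List.nodup_cons.1 hnd.2.1).1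
    rw [List.foldl_cons]
    by_cases hc : A.contains n = true
    · have h1 : aOuter D (gs, A) (n, R) = (gs, A) := by unfold aOuter; rw [if_pos hc]
      have hcond : (!A.contains n) = false := by rw [hc]; rfl
      have h2 : pvRem A ((n, R) :: s') = pvRem A s' := by
        unfold pvRem; rw [List.filter_cons, if_neg (fun hcontra => by rw [hcond] at hcontra; exact Bool.false_ne_true hcontra)]
      rw [h1, h2, ih (p ++ [(n, R)]) gs A (by rw [hD]; simp) ?_]
      intro x hxm
      rcases List.mem_append.1 hxm with h | h
      · exact hp x h
      · have hxe : x = (n, R) := by simpa using h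
        subst hxe
        exact (PySem.Set.contains_iff A n).1 hc
    · -- n becomes a new seed
      have hcf : A.contains n = false := Bool.eq_false_iff.2 hc
      have hAn : n ∈ A.add n := (PySem.Set.mem_add A n n).2 (Or.inr rfl)
      have h1 : aOuter D (gs, A) (n, R)
          = (gs ++ [(D.foldl (aInner R) ([n], A.add n)).1],
             (D.foldl (aInner R) ([n], A.add n)).2) := by
        unfold aOuter; rw [if_neg hc]
      have hinner := inner_spec R D [n] (A.add n) hnd
      have hS1 : pvSel R (A.add n) D = pvSel R (A.add n) s' := by
        rw [hD, pvSel, List.filter_append, List.filter_cons]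
        have hp0 : List.filter (fun x => !(A.add n).contains x.1 && ovb R x.2) p = [] := by
          apply List.filter_eq_nil_iff.2
          intro x hxp
          have hmem : x.1 ∈ A.add n := (PySem.Set.mem_add A n x.1).2 (Or.inl (hp x hxp))
          have hcc : ((A.add n).contains x.1 : Bool) = true := (PySem.Set.contains_iff _ _).2 hmem
          have hz : (!(A.add n).contains x.1 && ovb R x.2) = false := by rw [hcc]; rfl
          exact fun hcontra => by rw [hz] at hcontra; exact Bool.false_ne_true hcontra
        have hh : ((A.add n).contains n : Bool) = true := (PySem.Set.contains_iff _ _).2 hAn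
        simp only [hp0, hh, Bool.not_true, Bool.false_and, List.nil_append]
        rw [if_neg (by simp)]
        rfl
      have hS2 : pvSel R (A.add n) s' = pvSel R A s' := by
        apply List.filter_congr
        intro y hy
        have hne : y.1 ≠ n := fun he => hns' (he ▸ List.mem_map_of_mem hy)
        rw [contains_add_of_ne A n y.1 hne]
      have hS2b : pvSel R A s' = (pvRem A s').filter (fun x => ovb R x.2) := by
        rw [pvRem, List.filter_filter, pvSel]
        exact (List.filter_congr (by intro y _; rw [Bool.and_comm])).symm
      have hinj : ∀ x ∈ s', ∀ y ∈ s', x.1 = y.1 → x = y := by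
        intro x hxm y hym hxy
        exact List.inj_on_of_nodup_map hnds' hxm hym hxy
      rw [h1, hinner, hS1, hS2, hS2b]
      set A2 := (((pvRem A s').filter (fun x => ovb R x.2)).foldl (fun s x => s.add x.1) (A.add n)) with hA2
      have hmemA2 : ∀ y, y ∈ A2 ↔ y ∈ A ∨ y = n ∨
          ∃ b ∈ (pvRem A s').filter (fun x => ovb R x.2), y = b.1 := by
        intro y
        have h0 := PySem.Set.mem_foldl_add ((pvRem A s').filter (fun x => ovb R x.2))
          (fun x : String × List String => x.1) (A.add n) y
        rw [PySem.Set.mem_add] at h0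
        exact h0.trans (by tauto)
      rw [ih (p ++ [(n, R)]) _ A2 (by rw [hD]; simp) ?_]
      · have hcnd2 : (!A.contains n) = true := by rw [hcf]; rfl
        have hrem : pvRem A ((n, R) :: s') = (n, R) :: pvRem A s' := by
          unfold pvRem; rw [List.filter_cons, if_pos hcnd2]
        have hS3 : pvRem A2 s' = (pvRem A s').filter (fun x => !ovb R x.2) := by
          rw [pvRem, pvRem, List.filter_filter]
          apply List.filter_congr
          intro x hxm
          by_cases hxA : x.1 ∈ A
          · have hb1 : A2.contains x.1 = true := (PySem.Set.contains_iff _ _).2 ((hmemA2 x.1).2 (Or.inl hxA))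
            have hb2 : A.contains x.1 = true := (PySem.Set.contains_iff _ _).2 hxA
            rw [hb1, hb2]; simp
          · by_cases hov : ovb R x.2 = true
            · have hxsel : x ∈ (pvRem A s').filter (fun x => ovb R x.2) := by
                rw [List.mem_filter, pvRem, List.mem_filter]
                exact ⟨⟨hxm, by rw [(contains_eq_false_iff A x.1).2 hxA]; rfl⟩, hov⟩
              have hb1 : A2.contains x.1 = true :=
                (PySem.Set.contains_iff _ _).2 ((hmemA2 x.1).2 (Or.inr (Or.inr ⟨x, hxsel, rfl⟩)))
              rw [hb1, hov]; rfl
            · have hxn : x.1 ≠ n := fun he => hns' (he ▸ List.mem_map_of_mem hxm)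
              have hnot : x.1 ∉ A2 := by
                rw [hmemA2]
                rintro (h | h | ⟨b, hb, hxb⟩)
                · exact hxA h
                · exact hxn h
                · have hbs : b ∈ s' := (List.mem_filter.1 (List.mem_filter.1 hb).1).1
                  have hxb2 : x = b := hinj x hxm b hbs hxb
                  subst hxb2
                  exact hov (List.mem_filter.1 hb).2
              rw [(contains_eq_false_iff _ _).2 hnot, (contains_eq_false_iff _ _).2 hxA,
                Bool.eq_false_iff.2 hov]
              rfl
        rw [hrem, hS3]
        rw [PRef]
        simp
      · intro x hxm
        rcases List.mem_append.1 hxm with h | h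
        · exact (hmemA2 x.1).2 (Or.inl (hp x h))
        · have hxe : x = (n, R) := by simpa using h
          subst hxe
          exact (hmemA2 n).2 (Or.inr (Or.inl rfl))

theorem aCluster_eq (cluster : List String) : aCluster cluster = PRef (pvItems cluster) := by
  unfold aCluster
  simp only [items_foldl_insert_eq]
  have hnd : ((pvItems cluster).map (fun x => x.1)).Nodup := by
    rw [pvItems, List.map_map]
    have hid : ((fun x : String × List String => x.1) ∘ fun n => (n, extract_regions n)) = id := rfl
    rw [hid, List.map_id]
    exact nodup_pvDedup_empty cluster
  rw [outer_spec (pvItems cluster) hnd (pvItems cluster) [] [] PySem.Set.empty (by simp)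
    (by intro x hx; cases hx)]
  have hrem : pvRem PySem.Set.empty (pvItems cluster) = pvItems cluster := by
    unfold pvRem
    apply List.filter_eq_self.2
    intro x _
    rw [(contains_eq_false_iff _ _).2 (by simp [PySem.Set.empty])]
    rfl
  rw [hrem, List.nil_append]

-- ---- B side ----

theorem bGo_reduce :
    ∀ (cluster : List String) (gs : List (List String)) (m : PySem.Dict String Nat)
      (seen : PySem.Set String),
    bGo cluster gs m seen
      = bGo' ((pvDedup seen cluster).map (fun n => (n, extract_regions n))) gs m := by
  intro cluster
  induction cluster with
  | nil => intro gs m seen; simp [bGo, pvDedup, bGo']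
  | cons n rest ih =>
    intro gs m seen
    by_cases hc : seen.contains n = true
    · have h1 : bGo (n :: rest) gs m seen = bGo rest gs m seen := by
        conv_lhs => rw [bGo]
        rw [if_pos hc]
      have h2 : pvDedup seen (n :: rest) = pvDedup seen rest := by
        simp only [pvDedup]; rw [if_pos hc]
      rw [h1, h2, ih]
    · have h2 : pvDedup seen (n :: rest) = n :: pvDedup (seen.add n) rest := by
        simp only [pvDedup]; rw [if_neg hc]
      rw [h2, List.map_cons]
      show bGo (n :: rest) gs m seen
        = bGo' ((n, extract_regions n) :: (pvDedup (seen.add n) rest).map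
            (fun n => (n, extract_regions n))) gs m
      simp only [bGo, bGo', bExtract_eq]
      rw [if_neg hc]
      cases PySem.List.min? ((extract_regions n).filterMap (fun r => m.get? r))
          (fun i => i) with
      | some i => exact ih _ _ _
      | none => exact ih _ _ _

theorem pvCapt_nil (σ : List (List String)) : pvCapt σ [] = (σ.map (fun _ => []), []) := by
  induction σ with
  | nil => simp [pvCapt]
  | cons S σ ih => simp [pvCapt, ih]

theorem pvCapt_length (σ : List (List String)) (l : List (String × List String)) :
    (pvCapt σ l).1.length = σ.length := by
  induction σ generalizing l with
  | nil => simp [pvCapt]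
  | cons S σ ih => simp [pvCapt, ih]

theorem pvCapt_append (σ : List (List String)) (R : List String)
    (l : List (String × List String)) :
    pvCapt (σ ++ [R]) l
      = ((pvCapt σ l).1 ++ [((pvCapt σ l).2.filter (fun x => ovb R x.2)).map (fun x => x.1)],
         (pvCapt σ l).2.filter (fun x => !ovb R x.2)) := by
  induction σ generalizing l with
  | nil => simp [pvCapt]
  | cons S σ ih => simp [pvCapt, ih]

theorem pvCapt_cons_noov (σ : List (List String)) (n : String) (R : List String)
    (l : List (String × List String)) (h : ∀ S ∈ σ, ovb S R = false) :
    pvCapt σ ((n, R) :: l) = ((pvCapt σ l).1, (n, R) :: (pvCapt σ l).2) := by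
  induction σ generalizing l with
  | nil => simp [pvCapt]
  | cons S σ ih =>
    have hS : ovb S R = false := h S (List.mem_cons_self)
    simp only [pvCapt, List.filter_cons]
    rw [if_neg (fun hcontra => by rw [hS] at hcontra; exact Bool.false_ne_true hcontra),
      if_pos (by rw [hS]; rfl)]
    simp [ih _ (fun S' hS' => h S' (List.mem_cons_of_mem _ hS'))]

theorem pvCapt_cons_ov (σ : List (List String)) (n : String) (R : List String)
    (l : List (String × List String)) (i : Nat) (hi : i < σ.length)
    (hov : ovb σ[i] R = true) (hlt : ∀ j (hj : j < σ.length), j < i → ovb σ[j] R = false) :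
    pvCapt σ ((n, R) :: l)
      = ((pvCapt σ l).1.modify i (fun c => n :: c), (pvCapt σ l).2) := by
  induction σ generalizing l i with
  | nil => exact absurd hi (by simp)
  | cons S σ ih =>
    cases i with
    | zero =>
      have hS : ovb S R = true := by simpa using hov
      simp [pvCapt, hS]
    | succ i =>
      have hi' : i < σ.length := by simpa using hi
      have hS : ovb S R = false := hlt 0 (by simp) (Nat.succ_pos i)
      simp only [pvCapt, List.filter_cons]
      rw [if_neg (fun hcontra => by rw [hS] at hcontra; exact Bool.false_ne_true hcontra),
        if_pos (by rw [hS]; rfl)]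
      have hov' : ovb σ[i] R = true := by simpa using hov
      have hlt' : ∀ j (hj : j < σ.length), j < i → ovb σ[j] R = false := by
        intro j hj hji
        have := hlt (j + 1) (by simpa using Nat.succ_lt_succ hj) (Nat.succ_lt_succ hji)
        simpa using this
      rw [ih _ i hi' hov' hlt']
      simp

theorem zipWith_append_nils (gs σ : List (List String)) (h : gs.length = σ.length) :
    List.zipWith (· ++ ·) gs (σ.map (fun _ => ([] : List String))) = gs := by
  induction gs generalizing σ with
  | nil => simp
  | cons g gs ih =>
    cases σ with
    | nil => simp at h
    | cons S σ =>
      have hih := ih σ (by simpa using h)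
      simpa using hih

theorem zipWith_modify (gs caps : List (List String)) (i : Nat) (n : String)
    (h : gs.length = caps.length) :
    List.zipWith (· ++ ·) gs (caps.modify i (fun c => n :: c))
      = List.zipWith (· ++ ·) (gs.modify i (fun g => g ++ [n])) caps := by
  induction gs generalizing caps i with
  | nil => simp
  | cons g gs ih =>
    cases caps with
    | nil => simp
    | cons c caps =>
      cases i with
      | zero => simp
      | succ i => simp [ih caps i (by simpa using h)]

theorem get?_foldl_insert_const (R : List String) (v : Nat) :
    ∀ (m : PySem.Dict String Nat) (k : String),
    ((R.foldl (fun m r => m.insert r v) m).get? k) = if k ∈ R then some v else m.get? k := by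
  induction R with
  | nil => intro m k; simp
  | cons r R ih =>
    intro m k
    rw [List.foldl_cons, ih]
    by_cases h1 : k ∈ R
    · simp [h1]
    · by_cases h2 : k = r
      · subst h2; simp [h1]
      · simp [h1, h2, PySem.Dict.get?_insert]

theorem bMain :
    ∀ (l : List (String × List String)) (gs : List (List String))
      (m : PySem.Dict String Nat) (σ : List (List String)),
    gs.length = σ.length → pvInv m σ →
    bGo' l gs m
      = List.zipWith (· ++ ·) gs (pvCapt σ l).1 ++ PRef (pvCapt σ l).2 := by
  intro l
  induction l with
  | nil =>
    intro gs m σ hlen hinv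
    rw [bGo', pvCapt_nil, zipWith_append_nils gs σ hlen]
    simp [PRef]
  | cons x rest ih =>
    obtain ⟨n, R⟩ := x
    intro gs m σ hlen hinv
    unfold bGo'
    cases hmin : PySem.List.min? (R.filterMap (fun r => m.get? r)) (fun i => i) with
    | none =>
      -- no region of R is mapped: n becomes a new seed
      change bGo' rest (gs ++ [[n]]) (R.foldl (fun m r => m.insert r gs.length) m)
        = List.zipWith (· ++ ·) gs (pvCapt σ ((n, R) :: rest)).1
            ++ PRef (pvCapt σ ((n, R) :: rest)).2
      have hfm : R.filterMap (fun r => m.get? r) = [] :=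
        (PySem.List.min?_eq_none_iff _ _).1 hmin
      have hnone : ∀ r ∈ R, m.get? r = none := List.filterMap_eq_nil_iff.1 hfm
      have hnoov : ∀ S ∈ σ, ovb S R = false := by
        intro S hS
        cases hovb : ovb S R
        · rfl
        · exfalso
          obtain ⟨r, hrS, hrR⟩ := (ovb_iff S R).1 hovb
          obtain ⟨j, hj, hSj⟩ := List.mem_iff_getElem.1 hS
          have hsome : m.get? r = some j := (hinv r j).2 ⟨hj, by rw [hSj]; exact hrS⟩
          rw [hnone r hrR] at hsome
          cases hsome
      have hlen' : (gs ++ [[n]]).length = (σ ++ [R]).length := by simp [hlen]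
      have hinv' : pvInv (R.foldl (fun m r => m.insert r gs.length) m) (σ ++ [R]) := by
        intro r i
        rw [get?_foldl_insert_const R gs.length m r]
        by_cases hrR : r ∈ R
        · rw [if_pos hrR]
          constructor
          · intro hsome
            have hieq : i = σ.length := by
              have := Option.some.inj hsome
              omega
            subst hieq
            exact ⟨by simp, by simp only [List.getElem_concat_length]; exact hrR⟩
          · rintro ⟨hi, hmem⟩
            have hieq : i = σ.length := by
              by_contra hne
              have hilt : i < σ.length := by simp at hi; omega
              rw [List.getElem_append_left hilt] at hmem
              have := (hinv r i).2 ⟨hilt, hmem⟩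
              rw [hnone r hrR] at this
              cases this
            subst hieq
            rw [hlen]
        · rw [if_neg hrR]
          constructor
          · intro hsome
            obtain ⟨hi, hmem⟩ := (hinv r i).1 hsome
            exact ⟨by simp; omega, by rw [List.getElem_append_left hi]; exact hmem⟩
          · rintro ⟨hi, hmem⟩
            have hilt : i < σ.length := by
              by_contra hge
              have hieq : i = σ.length := by simp at hi; omega
              subst hieq
              simp only [List.getElem_concat_length] at hmem
              exact hrR hmem
            rw [List.getElem_append_left hilt] at hmem
            exact (hinv r i).2 ⟨hilt, hmem⟩
      rw [ih _ _ _ hlen' hinv', pvCapt_append, pvCapt_cons_noov σ n R rest hnoov,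
        List.zipWith_append (by rw [hlen, pvCapt_length])]
      rw [PRef]
      simp
    | some i0 =>
      -- some region of R is mapped: n joins the earliest overlapping seed
      have hi0mem : i0 ∈ R.filterMap (fun r => m.get? r) := PySem.List.min?_mem hmin
      obtain ⟨r0, hr0R, hr0get⟩ := List.mem_filterMap.1 hi0mem
      obtain ⟨hi0lt, hr0in⟩ := (hinv r0 i0).1 hr0get
      have hov0 : ovb σ[i0] R = true := (ovb_iff _ _).2 ⟨r0, hr0in, hr0R⟩
      change bGo' rest (gs.modify i0 (fun g => g ++ [n])) m
        = List.zipWith (· ++ ·) gs (pvCapt σ ((n, R) :: rest)).1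
            ++ PRef (pvCapt σ ((n, R) :: rest)).2
      have hltmin : ∀ j (hj : j < σ.length), j < i0 → ovb σ[j] R = false := by
        intro j hj hji
        cases hovb : ovb σ[j] R
        · rfl
        · exfalso
          obtain ⟨r', hr'S, hr'R⟩ := (ovb_iff _ _).1 hovb
          have hj' : m.get? r' = some j := (hinv r' j).2 ⟨hj, hr'S⟩
          have hjmem : j ∈ R.filterMap (fun r => m.get? r) :=
            List.mem_filterMap.2 ⟨r', hr'R, hj'⟩
          have := PySem.List.min?_isMin hmin j hjmem
          omega
      rw [ih _ _ _ (by rw [List.length_modify]; exact hlen) hinv,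
        pvCapt_cons_ov σ n R rest i0 hi0lt hov0 hltmin,
        zipWith_modify gs (pvCapt σ rest).1 i0 n (by rw [hlen, pvCapt_length])]

theorem bCluster_eq (cluster : List String) : bCluster cluster = PRef (pvItems cluster) := by
  unfold bCluster
  rw [bGo_reduce]
  have hinv0 : pvInv PySem.Dict.empty [] := by
    intro r i
    rw [PySem.Dict.get?_empty]
    constructor
    · intro h; cases h
    · rintro ⟨h, _⟩; simp at h
  rw [bMain _ [] PySem.Dict.empty [] rfl hinv0]
  rfl

-- ===== VERDICT (by name: the statement is the Claim_ definition above) =====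
theorem postprocess_by_region_spec : Claim_equal_postprocess_by_region := by
  intro clusters _
  unfold Spec_postprocess_by_region postprocess_by_region postprocess_by_region_alt
  rw [PySem.List.foldl_append_eq_flatMap]
  rw [show aCluster = bCluster from funext fun c => (aCluster_eq c).trans (bCluster_eq c).symm]
  rfl
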